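-- pv_equiv track=rewrite | github.com/agentcost-org/agentcost-backend | app/services/pricing_service.py | _parse_litellm_model_key
-- ===== SOURCE A (Python) =====
-- from typing import Dict, List, Optional, Tuple, Any
--
-- PROVIDER_PREFIXES = {
--     "openai/": "openai",
--     "anthropic/": "anthropic",
--     "google/": "google",
--     "vertex_ai/": "google",
--     "groq/": "groq",
--     "mistral/": "mistral",
--     "cohere/": "cohere",
--     "deepseek/": "deepseek",
--     "together_ai/": "together",
--     "fireworks_ai/": "fireworks",
--     "azure/": "azure",
--     "bedrock/": "aws",
-- }
--
-- def _parse_litellm_model_key(model_key: str) -> Tuple[str, str]: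
--     """Parse model key into (name, provider)."""
--     for prefix, prov in PROVIDER_PREFIXES.items():
--         if model_key.startswith(prefix):
--             return (model_key[len(prefix):], prov)
--
--     if "/" in model_key:
--         parts = model_key.split("/", 1)
--         return (parts[1], parts[0])
--
--     return (model_key, "unknown")
-- ===== SOURCE B (Python) =====
-- PROVIDER_PREFIXES = {
--     "openai/": "openai",
--     "anthropic/": "anthropic",
--     "google/": "google",
--     "vertex_ai/": "google",
--     "groq/": "groq",
--     "mistral/": "mistral",
--     "cohere/": "cohere",
--     "deepseek/": "deepseek",
--     "together_ai/": "together",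
--     "fireworks_ai/": "fireworks",
--     "azure/": "azure",
--     "bedrock/": "aws",
-- }
--
-- def _parse_litellm_model_key(model_key):
--     """Parse model key into (name, provider)."""
--     i = model_key.find("/")
--     if i < 0:
--         return (model_key, "unknown")
--     head, rest = model_key[:i], model_key[i + 1:]
--     return (rest, PROVIDER_PREFIXES.get(head + "/", head))
-- ===== Notes on version B (the rewrite author's own statement) =====
-- stated objective: simpler
-- what changed: Replaces the scan over all 12 provider prefixes with startswith by locating the first '/' once, slicing head/rest, and doing a single dict lookup of head+'/'; the no-slash and unknown-provider fallbacks collapse into the same slice.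
import Mathlib
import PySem

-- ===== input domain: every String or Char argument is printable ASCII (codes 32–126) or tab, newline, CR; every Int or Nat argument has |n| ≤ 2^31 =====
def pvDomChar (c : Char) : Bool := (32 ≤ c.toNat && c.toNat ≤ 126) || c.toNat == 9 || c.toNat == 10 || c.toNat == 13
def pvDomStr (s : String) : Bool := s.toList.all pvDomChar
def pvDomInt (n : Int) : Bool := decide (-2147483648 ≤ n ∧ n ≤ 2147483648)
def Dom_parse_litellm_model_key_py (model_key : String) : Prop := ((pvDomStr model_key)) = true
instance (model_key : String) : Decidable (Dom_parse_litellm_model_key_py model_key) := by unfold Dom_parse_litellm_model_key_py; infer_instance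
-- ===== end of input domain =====

-- B replaces A's scan over all 12 provider prefixes by locating the first '/' once,
-- slicing head/rest, and doing a single dict lookup of head + "/" (objective: simpler).

-- ===== PORT A =====
-- PROVIDER_PREFIXES (module constant), shared verbatim by both programs
def pvProviderPrefixes : PySem.Dict String String := PySem.Dict.ofList
  [("openai/", "openai"), ("anthropic/", "anthropic"), ("google/", "google"),
   ("vertex_ai/", "google"), ("groq/", "groq"), ("mistral/", "mistral"),
   ("cohere/", "cohere"), ("deepseek/", "deepseek"), ("together_ai/", "together"),
   ("fireworks_ai/", "fireworks"), ("azure/", "azure"), ("bedrock/", "aws")]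

-- the `for prefix, prov in PROVIDER_PREFIXES.items(): if model_key.startswith(prefix): return …` loop
def pvPrefixLoopA : List (String × String) → String → Option (String × String)
  | [], _ => none
  | (pre, prov) :: rest, s =>
      if PySem.Str.startswith s pre then
        some (PySem.Str.slice s (some (PySem.Str.len pre)) none, prov)
      else pvPrefixLoopA rest s

def parse_litellm_model_key_py (model_key : String) : String × String :=
  match pvPrefixLoopA pvProviderPrefixes.items model_key with
  | some r => r
  | none =>
    if PySem.Str.isIn "/" model_key then
      -- parts = model_key.split("/", 1); return (parts[1], parts[0])
      match PySem.Str.splitMax? model_key "/" 1 with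
      | some parts => (parts.getD 1 "", parts.getD 0 "")
      | none => ("", "")   -- unreachable totality guard: the separator "/" is non-empty
    else (model_key, "unknown")

-- ===== PORT B =====
def parse_litellm_model_key_py_alt (model_key : String) : String × String :=
  let i := PySem.Str.find model_key "/"
  if i < 0 then (model_key, "unknown")
  else
    let head := PySem.Str.slice model_key none (some i)
    let rest := PySem.Str.slice model_key (some (i + 1)) none
    (rest, PySem.Dict.getD pvProviderPrefixes (head ++ "/") head)

-- ===== PRECONDITION & SPEC =====
def Spec_parse_litellm_model_key_py (model_key : String) (out : String × String) : Prop := out = parse_litellm_model_key_py_alt model_key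
instance (model_key : String) (out : String × String) : Decidable (Spec_parse_litellm_model_key_py model_key out) := by unfold Spec_parse_litellm_model_key_py; infer_instance

-- ===== CLAIM (what is proved, stated in full; the proofs are below) =====
def Claim_equal_parse_litellm_model_key_py : Prop := ∀ (model_key : String), Dom_parse_litellm_model_key_py model_key → Spec_parse_litellm_model_key_py model_key (parse_litellm_model_key_py model_key)

-- ===== LEMMAS AND PROOFS =====

-- [c] is a prefix of l iff l starts with c
lemma pv_singleton_prefix {c : Char} {l : List Char} : [c] <+: l ↔ l.head? = some c := by
  cases l with
  | nil => simp
  | cons a t => simp [List.cons_prefix_cons, eq_comm]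

-- A prefix of the form q++['/'] matches h++'/'::t exactly when q = h (q, h slash-free)
lemma pv_prefix_slash {q h : List Char} (t : List Char)
    (hq : '/' ∉ q) (hh : '/' ∉ h) : (q ++ ['/']) <+: (h ++ '/' :: t) ↔ q = h := by
  induction q generalizing h with
  | nil =>
    cases h with
    | nil => simp
    | cons a h' =>
      have ha : ('/' : Char) ≠ a := fun hx => hh (by simp [hx.symm])
      simp [List.cons_prefix_cons, ha]
  | cons a q' ih =>
    cases h with
    | nil =>
      have ha : a ≠ '/' := fun hx => hq (by simp [hx])
      simp [List.cons_prefix_cons, ha]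
    | cons b h' =>
      simp only [List.cons_append, List.cons_prefix_cons, List.cons.injEq]
      rw [ih (fun hx => hq (by simp [hx])) (fun hx => hh (by simp [hx]))]

-- the value of find on h ++ '/'::t with h slash-free
lemma pv_find_eq {h t : List Char} (hh : '/' ∉ h) :
    PySem.Chars.find (h ++ '/' :: t) ['/'] = (h.length : Int) := by
  have hinf : ['/'] <:+: (h ++ '/' :: t) := by
    rw [List.singleton_infix_iff]; simp
  have hnn : 0 ≤ PySem.Chars.find (h ++ '/' :: t) ['/'] :=
    (PySem.Chars.find_nonneg_iff _ _).mpr hinf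
  obtain ⟨hpre, hmin⟩ := PySem.Chars.find_spec (s := h ++ '/' :: t) (sub := ['/']) hnn
  set n := (PySem.Chars.find (h ++ '/' :: t) ['/']).toNat with hn
  have hat : (h ++ '/' :: t)[n]? = some '/' := by
    rw [← List.head?_drop]; exact pv_singleton_prefix.mp hpre
  have hlen : n = h.length := by
    rcases lt_trichotomy n h.length with hlt | heq | hgt
    · exfalso
      have : (h ++ '/' :: t)[n]? = h[n]? := List.getElem?_append_left hlt
      rw [this] at hat
      exact hh (List.mem_of_getElem? hat)
    · exact heq
    · exfalso
      apply hmin h.length hgt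
      rw [pv_singleton_prefix, List.head?_drop, List.getElem?_append_right (le_refl _)]
      simp
  omega

-- splitOnMax.go with no splits left returns the remainder as one piece
lemma pv_go_m0 (fuel : Nat) (l cur : List Char) (acc : List (List Char)) :
    PySem.Chars.splitOnMax.go ['/'] fuel 0 l cur acc = ((cur.reverse ++ l) :: acc).reverse := by
  cases fuel with
  | zero => simp [PySem.Chars.splitOnMax.go]
  | succ f => cases l with
    | nil => simp [PySem.Chars.splitOnMax.go]
    | cons c r => simp [PySem.Chars.splitOnMax.go]

lemma pv_go_split {h : List Char} (hh : '/' ∉ h) :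
    ∀ (fuel : Nat) (t cur : List Char) (acc : List (List Char)), h.length + 1 ≤ fuel →
    PySem.Chars.splitOnMax.go ['/'] fuel 1 (h ++ '/' :: t) cur acc
      = acc.reverse ++ [cur.reverse ++ h, t] := by
  induction h with
  | nil =>
    intro fuel t cur acc hf
    cases fuel with
    | zero => omega
    | succ f =>
      simp only [List.nil_append]
      rw [PySem.Chars.splitOnMax.go]
      simp [List.isPrefixOf, pv_go_m0]
  | cons c h' ih =>
    intro fuel t cur acc hf
    cases fuel with
    | zero => omega
    | succ f =>
      have hc : c ≠ '/' := fun hx => hh (by simp [hx])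
      simp only [List.cons_append]
      rw [PySem.Chars.splitOnMax.go]
      have : ¬ (['/'].isPrefixOf (c :: (h' ++ '/' :: t)) = true) := by
        simp [List.isPrefixOf, hc.symm]
      simp only [this, if_neg (by omega : ¬ (1 : Nat) = 0)]
      rw [ih (fun hx => hh (by simp [hx])) f t (c :: cur) acc (by simp at hf ⊢; omega)]
      simp

lemma pv_splitMax {h t : List Char} (hh : '/' ∉ h) :
    PySem.Chars.splitMax? (h ++ '/' :: t) ['/'] 1 = some [h, t] := by
  rw [PySem.Chars.splitMax?]
  simp only [List.isEmpty_cons, Bool.false_eq_true, reduceIte]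
  rw [PySem.Chars.splitOnMax]
  rw [if_neg (show ¬ ((1 : Int) < 0) by omega)]
  rw [show (1 : Int).toNat = 1 from rfl,
    pv_go_split hh _ t [] [] (by simp only [List.length_append, List.length_cons]; omega)]
  simp

-- A's prefix loop equals B's dict lookup, mapped onto the common output shape
lemma pv_loop_eq_lookup (table : List (String × String))
    (hq : ∀ p ∈ table, ∃ q : List Char, p.1.toList = q ++ ['/'] ∧ '/' ∉ q)
    {h t : List Char} (hh : '/' ∉ h) (s head : String)
    (hs : s.toList = h ++ '/' :: t) (hhead : head.toList = h) :
    pvPrefixLoopA table s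
      = (PySem.Dict.get? (PySem.Dict.mk table) (head ++ "/")).map
          (fun prov => (String.ofList t, prov)) := by
  induction table with
  | nil => simp [pvPrefixLoopA, PySem.Dict.get?]
  | cons p rest ih =>
    obtain ⟨pre, prov⟩ := p
    obtain ⟨q, hq1, hq2⟩ := hq (pre, prov) (by simp)
    dsimp only at hq1
    have hkey : (pre == head ++ "/") = decide (q = h) := by
      have : pre = head ++ "/" ↔ q = h := by
        constructor
        · intro he
          have := congrArg String.toList he
          rw [hq1, String.toList_append, hhead] at this
          simpa using this
        · intro he
          apply String.toList_injective
          rw [hq1, String.toList_append, hhead, he]; rfl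
      by_cases hqh : q = h
      · simp [this.mpr hqh, hqh]
      · have hne : pre ≠ head ++ "/" := fun he => hqh (this.mp he)
        simp [hqh, hne]
    have hsws : PySem.Str.startswith s pre = decide (q = h) := by
      rw [PySem.Str.startswith]
      have : PySem.Chars.startswith s.toList pre.toList = true ↔ q = h := by
        rw [PySem.Chars.startswith_iff, hs, hq1, pv_prefix_slash t hq2 hh]
      by_cases hqh : q = h
      · simp [this.mpr hqh, hqh]
      · simp only [hqh, decide_false]
        exact Bool.eq_false_iff.mpr (fun hx => hqh (this.mp hx))
    rw [pvPrefixLoopA, hsws]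
    by_cases hqh : q = h
    · simp only [hqh, decide_true, if_true]
      have hlen : PySem.Str.len pre = ((h.length : Int) + 1) := by
        rw [PySem.Str.len_eq, hq1, hqh]; simp
      have hslice : PySem.Str.slice s (some (PySem.Str.len pre)) none = String.ofList t := by
        apply String.toList_injective
        rw [PySem.Str.toList_slice, PySem.Chars.slice_eq_listSlice, hlen, hs]
        rw [show ((h.length : Int) + 1) = ((h.length + 1 : Nat) : Int) by push_cast; ring,
          PySem.List.slice_from_natCast]
        simp
      rw [hslice]
      simp [PySem.Dict.get?, List.find?, hkey, hqh]
    · simp only [hqh, decide_false]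
      rw [ih (fun p hp => hq p (by simp [hp]))]
      simp [PySem.Dict.get?, List.find?, hkey, hqh]

-- with no '/', every prefix test fails
lemma pv_loop_none (table : List (String × String))
    (hq : ∀ p ∈ table, '/' ∈ p.1.toList) (s : String) (hs : '/' ∉ s.toList) :
    pvPrefixLoopA table s = none := by
  induction table with
  | nil => rfl
  | cons p rest ih =>
    obtain ⟨pre, prov⟩ := p
    have hsw : PySem.Str.startswith s pre = false := by
      apply Bool.eq_false_iff.mpr
      intro hx
      rw [PySem.Str.startswith] at hx
      have hpre := (PySem.Chars.startswith_iff _ _).mp hx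
      exact hs (hpre.subset (hq (pre, prov) (by simp)))
    rw [pvPrefixLoopA, hsw]
    simp only [Bool.false_eq_true, if_false]
    exact ih (fun p hp => hq p (by simp [hp]))

-- every key of PROVIDER_PREFIXES is a slash-free name followed by '/'
lemma pv_table_shape :
    ∀ p ∈ pvProviderPrefixes.items, ∃ q : List Char, p.1.toList = q ++ ['/'] ∧ '/' ∉ q := by
  intro p hp
  refine ⟨p.1.toList.dropLast, ?_, ?_⟩ <;> fin_cases hp <;> decide

-- a string containing '/' decomposes as slash-free head ++ '/' :: tail
lemma pv_decomp {l : List Char} (hin : '/' ∈ l) :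
    ∃ t, l = l.takeWhile (fun c => decide (c ≠ '/')) ++ '/' :: t
      ∧ '/' ∉ l.takeWhile (fun c => decide (c ≠ '/')) := by
  induction l with
  | nil => cases hin
  | cons c r ih =>
    by_cases hc : c = '/'
    · subst hc
      exact ⟨r, by simp, by simp⟩
    · have hr : '/' ∈ r := by
        rcases List.mem_cons.mp hin with he | hm
        · exact absurd he.symm hc
        · exact hm
      obtain ⟨t, h1, h2⟩ := ih hr
      refine ⟨t, ?_, ?_⟩
      · have hd : decide (c ≠ '/') = true := by simp [hc]
        rw [List.takeWhile_cons, hd]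
        simp only [if_true, List.cons_append]
        exact congrArg (c :: ·) h1
      · intro hx
        have hd : decide (c ≠ '/') = true := by simp [hc]
        rw [List.takeWhile_cons, hd] at hx
        simp only [if_true] at hx
        rcases List.mem_cons.mp hx with he | hm
        · exact hc he.symm
        · exact h2 hm

-- main pointwise equality
lemma pv_main (s : String) :
    parse_litellm_model_key_py s = parse_litellm_model_key_py_alt s := by
  by_cases hin : '/' ∈ s.toList
  · -- a '/' occurs: both programs split at the first one
    obtain ⟨t, hs, hh⟩ := pv_decomp hin
    set h : List Char := s.toList.takeWhile (fun c => decide (c ≠ '/')) with hdef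
    have hfind : PySem.Str.find s "/" = (h.length : Int) := by
      rw [PySem.Str.find_eq, show "/".toList = ['/'] from rfl, hs]
      exact pv_find_eq hh
    have hhead : (PySem.Str.slice s none (some (h.length : Int))).toList = h := by
      rw [PySem.Str.toList_slice, PySem.Chars.slice_eq_listSlice,
        PySem.List.slice_to_natCast, hs, List.take_append_of_le_length (by simp)]
      simp
    have hrest : (PySem.Str.slice s (some ((h.length : Int) + 1)) none).toList = t := by
      rw [PySem.Str.toList_slice, PySem.Chars.slice_eq_listSlice,
        show ((h.length : Int) + 1) = ((h.length + 1 : Nat) : Int) by push_cast; ring,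
        PySem.List.slice_from_natCast, hs,
        show h ++ '/' :: t = (h ++ ['/']) ++ t by simp,
        show h.length + 1 = (h ++ ['/']).length by simp]
      exact List.drop_left
    have hloop := pv_loop_eq_lookup pvProviderPrefixes.items pv_table_shape hh s
      (PySem.Str.slice s none (some (h.length : Int))) hs hhead
    rw [parse_litellm_model_key_py, parse_litellm_model_key_py_alt]
    simp only [hfind]
    rw [if_neg (show ¬ ((h.length : Int) < 0) by omega)]
    rw [hloop]
    cases hget : PySem.Dict.get? (PySem.Dict.mk pvProviderPrefixes.items)
        (PySem.Str.slice s none (some (h.length : Int)) ++ "/") with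
    | some prov =>
      simp only [Option.map_some]
      rw [show (PySem.Dict.mk pvProviderPrefixes.items) = pvProviderPrefixes from rfl] at hget
      rw [PySem.Dict.getD, hget]
      simp only [Option.getD_some]
      refine Prod.ext ?_ rfl
      exact String.toList_injective (by rw [String.toList_ofList, hrest])
    | none =>
      simp only [Option.map_none]
      have hisin : PySem.Chars.isIn ['/'] s.toList = true := by
        rw [PySem.Chars.isIn_iff_infix, List.singleton_infix_iff]
        exact hin
      rw [show PySem.Str.isIn "/" s = PySem.Chars.isIn ['/'] s.toList from
        PySem.Str.isIn_eq "/" s, hisin]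
      simp only [if_true]
      have hsplit : PySem.Str.splitMax? s "/" 1 = some [String.ofList h, String.ofList t] := by
        have hb := PySem.Str.splitMax?_map s "/" 1
        rw [show "/".toList = ['/'] from rfl, hs, pv_splitMax hh] at hb
        cases hx : PySem.Str.splitMax? s "/" 1 with
        | none => rw [hx] at hb; simp at hb
        | some parts =>
          rw [hx] at hb
          simp only [Option.map_some, Option.some.injEq] at hb
          congr 1
          cases parts with
          | nil => simp at hb
          | cons a rest =>
            cases rest with
            | nil => simp at hb
            | cons b rest2 =>
              cases rest2 with
              | nil =>
                simp only [List.map_cons, List.map_nil, List.cons.injEq, and_true] at hb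
                obtain ⟨ha, hbb⟩ := hb
                rw [← ha, ← hbb, String.ofList_toList, String.ofList_toList]
              | cons c rest3 => simp at hb
      rw [hsplit]
      rw [show (PySem.Dict.mk pvProviderPrefixes.items) = pvProviderPrefixes from rfl] at hget
      rw [PySem.Dict.getD, hget]
      simp only [Option.getD_none, List.getD, Option.getD_some, List.getElem?_cons_succ,
        List.getElem?_cons_zero]
      refine Prod.ext ?_ ?_ <;> simp only []
      · exact (String.toList_injective (by rw [String.toList_ofList, hrest])).symm
      · exact (String.toList_injective (by rw [String.toList_ofList, hhead])).symm
  · -- no '/': prefix loop fails, find returns -1, both fall through to (s, "unknown")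
    have hloop : pvPrefixLoopA pvProviderPrefixes.items s = none := by
      apply pv_loop_none _ _ _ hin
      intro p hp
      obtain ⟨q, hq1, -⟩ := pv_table_shape p hp
      rw [hq1]; simp
    have hfind : PySem.Chars.find s.toList ['/'] = -1 := by
      rw [PySem.Chars.find_eq_neg_one_iff, List.singleton_infix_iff]
      exact hin
    have hisin : PySem.Chars.isIn ['/'] s.toList = false := by
      rw [PySem.Chars.isIn_eq_false_iff, List.singleton_infix_iff]
      exact hin
    rw [parse_litellm_model_key_py, parse_litellm_model_key_py_alt]
    simp [hloop, hfind, hisin, PySem.Str.find_eq, PySem.Str.isIn_eq]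

-- ===== VERDICT (by name: the statement is the Claim_ definition above) =====
theorem parse_litellm_model_key_py_spec : Claim_equal_parse_litellm_model_key_py := by
  intro s _
  unfold Spec_parse_litellm_model_key_py
  exact pv_main s
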